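-- pv_equiv track=rewrite | github.com/storm-credit/killingtime | scripts/filter_langs.py | rank_tracks
-- ===== SOURCE A (Python) =====
-- def normalize(code: str) -> str:
--     return code.lower().strip()
--
-- def rank_tracks(available: list[str], preference: list[str]) -> list[str]:
--     pref_norm = [normalize(p) for p in preference]
--     def score(track: str) -> tuple[int, int, str]:
--         norm = normalize(track)
--         base = norm.split("-")[0]
--         # exact match in preference beats base match
--         for i, p in enumerate(pref_norm):
--             if norm == p:
--                 return (0, i, track)
--         for i, p in enumerate(pref_norm):
--             if base == p.split("-")[0]:
--                 return (1, i, track)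
--         return (2, 999, track)
--     return sorted(available, key=score)
-- ===== SOURCE B (Python) =====
-- def normalize(code: str) -> str:
--     return code.lower().strip()
--
-- def rank_tracks(available: list[str], preference: list[str]) -> list[str]:
--     # one-pass partition into (class, index) buckets, then concatenate sorted buckets
--     pref_norm = [normalize(p) for p in preference]
--     pref_base = [p.split("-")[0] for p in pref_norm]
--     buckets = {}
--     for track in available:
--         norm = normalize(track)
--         base = norm.split("-")[0]
--         if norm in pref_norm:
--             tag = (0, pref_norm.index(norm))
--         elif base in pref_base:
--             tag = (1, pref_base.index(base))
--         else:
--             tag = (2, 999)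
--         buckets.setdefault(tag, []).append(track)
--     out = []
--     for cls in (0, 1):
--         for i in range(len(preference)):
--             out.extend(sorted(buckets.get((cls, i), [])))
--     out.extend(sorted(buckets.get((2, 999), [])))
--     return out
-- ===== Notes on version B (the rewrite author's own statement) =====
-- stated objective: alternative
-- what changed: A sorts all tracks with a computed (class, index, track) tuple key; B makes one classification pass that partitions tracks into (class, index) dict buckets and then concatenates the plainly-sorted buckets in class-then-index order, replacing the tuple-keyed global sort.
import Mathlib
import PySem

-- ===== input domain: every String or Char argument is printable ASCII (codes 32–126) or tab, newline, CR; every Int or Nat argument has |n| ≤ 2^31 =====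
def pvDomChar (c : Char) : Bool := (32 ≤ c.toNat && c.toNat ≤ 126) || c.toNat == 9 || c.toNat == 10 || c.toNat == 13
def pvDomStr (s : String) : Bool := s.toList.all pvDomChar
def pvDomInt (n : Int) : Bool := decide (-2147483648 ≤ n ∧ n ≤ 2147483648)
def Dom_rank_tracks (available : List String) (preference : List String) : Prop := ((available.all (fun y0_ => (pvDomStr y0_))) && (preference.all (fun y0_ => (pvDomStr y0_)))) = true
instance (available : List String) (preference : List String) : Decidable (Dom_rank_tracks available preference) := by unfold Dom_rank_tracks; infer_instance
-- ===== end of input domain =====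

-- B replaces A's single tuple-keyed sort by a one-pass partition into (class, index) buckets
-- followed by concatenation of the per-bucket plain sorts (objective: alternative decomposition).

-- ===== PORT A =====
-- normalize(code) = code.lower().strip()
def pvNormalize (code : String) : String := PySem.Str.strip (PySem.Str.lower code)

-- s.split("-")[0]; split with a non-empty separator never yields [], so headD "" is exact
def pvBase (s : String) : String := ((PySem.Str.split? s "-").getD []).headD ""

-- 'for i, p in enumerate(ps): if q(p): return i' as structural recursion over ps
def pvFirstIdx (q : String → Bool) (ps : List String) (i : Int) : Option Int :=
  match ps with
  | [] => none
  | p :: rest => if q p then some i else pvFirstIdx q rest (i + 1)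

-- score(track); tuples compare lexicographically in Python: class first, then (index, track)
-- as a lexicographic pair, which sorted2 below compares in exactly that order
def pvScore (prefNorm : List String) (track : String) : Int × (Int ×ₗ String) :=
  let norm := pvNormalize track
  let base := pvBase norm
  match pvFirstIdx (fun p => p == norm) prefNorm 0 with
  | some i => (0, toLex (i, track))
  | none =>
    match pvFirstIdx (fun p => pvBase p == base) prefNorm 0 with
    | some i => (1, toLex (i, track))
    | none => (2, toLex (999, track))

def rank_tracks (available : List String) (preference : List String) : List String :=
  let prefNorm := preference.map pvNormalize
  PySem.List.sorted2 available (fun t => (pvScore prefNorm t).1) (fun t => (pvScore prefNorm t).2) false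

-- ===== PORT B =====
-- the (class, index) tag of a track; membership guards make the .index lookups total
def pvTag (prefNorm prefBase : List String) (track : String) : Int × Int :=
  let norm := pvNormalize track
  let base := pvBase norm
  if norm ∈ prefNorm then (0, ((PySem.List.index? prefNorm norm).getD 0 : Nat))
  else if base ∈ prefBase then (1, ((PySem.List.index? prefBase base).getD 0 : Nat))
  else (2, 999)

-- buckets.setdefault(tag, []).append(track) = modify tag [] (· ++ [track])
def pvBuckets (prefNorm prefBase : List String) (available : List String) :
    PySem.Dict (Int × Int) (List String) :=
  available.foldl (fun d track => d.modify (pvTag prefNorm prefBase track) [] (· ++ [track]))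
    PySem.Dict.empty

def rank_tracks_alt (available : List String) (preference : List String) : List String :=
  let prefNorm := preference.map pvNormalize
  let prefBase := prefNorm.map pvBase
  let buckets := pvBuckets prefNorm prefBase available
  let out := [(0 : Int), 1].foldl (fun out cls =>
      (PySem.List.pyRange 0 (preference.length) 1).foldl (fun out i =>
        out ++ PySem.List.sorted (buckets.getD (cls, i) []) (fun x => x) false) out) []
  out ++ PySem.List.sorted (buckets.getD (2, 999) []) (fun x => x) false

-- ===== PRECONDITION & SPEC =====
def Spec_rank_tracks (available : List String) (preference : List String) (out : List String) : Prop := out = rank_tracks_alt available preference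
instance (available : List String) (preference : List String) (out : List String) : Decidable (Spec_rank_tracks available preference out) := by unfold Spec_rank_tracks; infer_instance

-- ===== CLAIM (what is proved, stated in full; the proofs are below) =====
def Claim_equal_rank_tracks : Prop := ∀ (available : List String) (preference : List String), Dom_rank_tracks available preference → Spec_rank_tracks available preference (rank_tracks available preference)

-- ===== LEMMAS AND PROOFS =====

-- sorted2's class-then-(index,track) comparison is the lexicographic order on the bundled key
theorem pv_sorted2_eq_sorted_toLex (xs : List String) (f : String → Int × (Int ×ₗ String)) :
    PySem.List.sorted2 xs (fun x => (f x).1) (fun x => (f x).2) false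
      = PySem.List.sorted xs (fun x => toLex (f x)) false := by
  simp only [PySem.List.sorted2, PySem.List.sorted, Bool.false_eq_true, if_false]
  have hbf : (fun a b => decide ((f a).1 < (f b).1)
        || (!decide ((f b).1 < (f a).1) && decide ((f a).2 < (f b).2)))
      = fun a b => decide (toLex (f a) < toLex (f b)) := by
    funext a b
    rcases lt_trichotomy ((f a).1) ((f b).1) with h | h | h
    · simp [Prod.Lex.lt_iff, h]
    · simp [Prod.Lex.lt_iff, h]
    · simp [Prod.Lex.lt_iff, h, asymm h, h.ne']
  rw [hbf]

-- the loop's first hit = index? of the mapped list, shifted by the start index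
theorem pvFirstIdx_map_eq (f : String → String) (v : String) :
    ∀ (ps : List String) (i : Int),
      pvFirstIdx (fun p => f p == v) ps i
        = match PySem.List.index? (ps.map f) v with
          | some k => some (i + (k : Int))
          | none => none := by
  intro ps
  induction ps with
  | nil => intro i; rfl
  | cons p rest ih =>
    intro i
    simp only [pvFirstIdx, List.map_cons]
    by_cases h : f p = v
    · simp only [h, beq_self_eq_true, if_true, PySem.List.index?_cons_self]
      simp
    · rw [PySem.List.index?_cons_of_ne (rest.map f) h, ih (i + 1)]
      simp only [beq_iff_eq, h, if_false]
      cases PySem.List.index? (rest.map f) v with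
      | none => rfl
      | some k =>
        simp only [Option.map_some]
        congr 1
        push_cast
        ring

-- the score key in terms of the tag
theorem pvScore_eq_tag (pN : List String) (t : String) :
    pvScore pN t
      = ((pvTag pN (pN.map pvBase) t).1,
          toLex ((pvTag pN (pN.map pvBase) t).2, t)) := by
  unfold pvScore pvTag
  have hid := pvFirstIdx_map_eq (fun p => p) (pvNormalize t) pN 0
  rw [List.map_id'] at hid
  have hb := pvFirstIdx_map_eq pvBase (pvBase (pvNormalize t)) pN 0
  by_cases h1 : pvNormalize t ∈ pN
  · obtain ⟨k, hk⟩ := Option.isSome_iff_exists.mp ((PySem.List.index?_isSome_iff _ _).mpr h1)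
    rw [hk] at hid
    rw [PySem.List.index?_eq_idxOf?] at hk
    simp [hid, hk, h1]
  · have hnone : PySem.List.index? pN (pvNormalize t) = none :=
      (PySem.List.index?_eq_none_iff _ _).mpr h1
    rw [hnone] at hid
    by_cases h2 : pvBase (pvNormalize t) ∈ pN.map pvBase
    · obtain ⟨k, hk⟩ := Option.isSome_iff_exists.mp ((PySem.List.index?_isSome_iff _ _).mpr h2)
      rw [hk] at hb
      rw [PySem.List.index?_eq_idxOf?] at hk
      simp [hid, hb, hk, h1, h2]
    · have hnone2 : PySem.List.index? (pN.map pvBase) (pvBase (pvNormalize t)) = none :=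
        (PySem.List.index?_eq_none_iff _ _).mpr h2
      rw [hnone2] at hb
      simp [hid, hb, h1, h2]

-- the bundled sort key both ports are compared through
def pvKeyOf (pN : List String) (t : String) : Lex (Int × Lex (Int × String)) :=
  toLex (pvScore pN t)

-- the ordered list of bucket tags B concatenates
def pvKeys (n : Nat) : List (Int × Int) :=
  ((PySem.List.pyRange 0 n 1).map fun i => ((0 : Int), i))
    ++ ((PySem.List.pyRange 0 n 1).map fun i => ((1 : Int), i))
    ++ [((2 : Int), 999)]

-- every track's tag is one of the emitted bucket tags
theorem pvTag_mem_pvKeys (pN : List String) (t : String) :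
    pvTag pN (pN.map pvBase) t ∈ pvKeys pN.length := by
  unfold pvTag pvKeys
  by_cases h1 : pvNormalize t ∈ pN
  · obtain ⟨k, hk⟩ := Option.isSome_iff_exists.mp ((PySem.List.index?_isSome_iff _ _).mpr h1)
    obtain ⟨hklt, -, -⟩ := PySem.List.getElem_of_index?_eq_some hk
    simp only [h1, if_true, hk, Option.getD_some]
    refine List.mem_append_left _ (List.mem_append_left _ ?_)
    simp only [List.mem_map, PySem.List.mem_pyRange_one]
    exact ⟨k, ⟨by positivity, by exact_mod_cast hklt⟩, rfl⟩
  · by_cases h2 : pvBase (pvNormalize t) ∈ pN.map pvBase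
    · obtain ⟨k, hk⟩ := Option.isSome_iff_exists.mp ((PySem.List.index?_isSome_iff _ _).mpr h2)
      obtain ⟨hklt, -, -⟩ := PySem.List.getElem_of_index?_eq_some hk
      rw [List.length_map] at hklt
      simp only [h1, if_false, h2, if_true, hk, Option.getD_some]
      refine List.mem_append_left _ (List.mem_append_right _ ?_)
      simp only [List.mem_map, PySem.List.mem_pyRange_one]
      exact ⟨k, ⟨by positivity, by exact_mod_cast hklt⟩, rfl⟩
    · simp [h1, h2]

-- the bucket tags come in strictly increasing (class, index) order
theorem pvKeys_pairwise (n : Nat) :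
    (pvKeys n).Pairwise (fun kk kk' => kk.1 < kk'.1 ∨ (kk.1 = kk'.1 ∧ kk.2 < kk'.2)) := by
  unfold pvKeys
  rw [List.pairwise_append]
  refine ⟨?_, List.pairwise_singleton _ _, ?_⟩
  · rw [List.pairwise_append]
    refine ⟨?_, ?_, ?_⟩
    · rw [List.pairwise_map]
      exact (PySem.List.pairwise_lt_pyRange_one 0 n).imp (fun h => Or.inr ⟨rfl, h⟩)
    · rw [List.pairwise_map]
      exact (PySem.List.pairwise_lt_pyRange_one 0 n).imp (fun h => Or.inr ⟨rfl, h⟩)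
    · intro x hx y hy
      simp only [List.mem_map] at hx hy
      obtain ⟨i, -, rfl⟩ := hx
      obtain ⟨j, -, rfl⟩ := hy
      exact Or.inl (by norm_num)
  · intro x hx y hy
    simp only [List.mem_append, List.mem_map] at hx
    simp only [List.mem_singleton] at hy
    subst hy
    rcases hx with ⟨i, -, rfl⟩ | ⟨i, -, rfl⟩ <;> exact Or.inl (by norm_num)

theorem pvKeys_nodup (n : Nat) : (pvKeys n).Nodup :=
  (pvKeys_pairwise n).imp (by
    rintro kk kk' (h | ⟨-, h⟩) rfl <;> exact absurd h (lt_irrefl _))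

-- each bucket of the fold is the filter of available by its tag
theorem pvBuckets_getD (pN pB : List String) (av : List String) (kk : Int × Int) :
    (pvBuckets pN pB av).getD kk [] = av.filter (fun t => pvTag pN pB t == kk) := by
  unfold pvBuckets
  have hmap : av.foldl (fun d track => d.modify (pvTag pN pB track) [] (· ++ [track]))
        PySem.Dict.empty
      = (av.map (fun t => (pvTag pN pB t, t))).foldl
          (fun d p => d.modify p.1 [] (· ++ [p.2])) PySem.Dict.empty := by
    rw [List.foldl_map]
  rw [hmap, PySem.Dict.getD_foldl_modify_append, PySem.Dict.getD_empty, List.filter_map,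
    List.map_map]
  simp [Function.comp_def]

-- B in partition normal form: concatenation of the per-tag sorted filters
theorem pv_alt_eq_flatMap (av pref : List String) :
    rank_tracks_alt av pref
      = (pvKeys pref.length).flatMap (fun kk =>
          PySem.List.sorted
            (av.filter (fun t =>
              pvTag (pref.map pvNormalize) ((pref.map pvNormalize).map pvBase) t == kk))
            (fun x => x) false) := by
  unfold rank_tracks_alt
  simp only [PySem.List.foldl_append_eq_flatMap]
  simp only [pvBuckets_getD]
  simp only [pvKeys, List.flatMap_append, List.flatMap_cons, List.flatMap_nil, List.flatMap_map,
    Function.comp, List.append_nil, List.nil_append, List.append_assoc]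

-- a nodup family of tags that covers every element partitions the list (up to permutation)
theorem pv_partition_perm (tagf : String → Int × Int) :
    ∀ (keys : List (Int × Int)) (l : List String), keys.Nodup → (∀ t ∈ l, tagf t ∈ keys) →
      (keys.flatMap (fun kk => l.filter (fun t => tagf t == kk))).Perm l := by
  intro keys
  induction keys with
  | nil =>
    intro l _ hcov
    have : l = [] := List.eq_nil_iff_forall_not_mem.mpr (fun t ht => by simpa using hcov t ht)
    simp [this]
  | cons kk ks ih =>
    intro l hnd hcov
    rw [List.flatMap_cons]
    have hrest : ks.flatMap (fun kk' => l.filter (fun t => tagf t == kk'))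
        = ks.flatMap (fun kk' =>
            (l.filter (fun t => !(tagf t == kk))).filter (fun t => tagf t == kk')) := by
      refine List.flatMap_congr (fun kk' hk' => ?_)
      rw [List.filter_filter]
      refine (List.filter_congr (fun t _ => ?_)).symm
      by_cases h : tagf t = kk'
      · have hkn : kk' ≠ kk := fun hh => (List.nodup_cons.mp hnd).1 (hh ▸ hk')
        simp [h, hkn]
      · simp [h]
    rw [hrest]
    have hcov' : ∀ t ∈ l.filter (fun t => !(tagf t == kk)), tagf t ∈ ks := by
      intro t ht
      rw [List.mem_filter] at ht
      have := hcov t ht.1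
      simp only [List.mem_cons] at this
      rcases this with h | h
      · exact absurd h (by simpa using ht.2)
      · exact h
    have := ih (l.filter (fun t => !(tagf t == kk))) (List.nodup_cons.mp hnd).2 hcov'
    refine List.Perm.trans ?_ (List.filter_append_perm (fun t => tagf t == kk) l)
    exact this.append_left _

-- the key of a track, through its tag
theorem pvKeyOf_eq (pN : List String) (t : String) :
    pvKeyOf pN t
      = toLex ((pvTag pN (pN.map pvBase) t).1,
          toLex ((pvTag pN (pN.map pvBase) t).2, t)) := by
  rw [pvKeyOf, pvScore_eq_tag]

theorem pvKeyOf_injective (pN : List String) : Function.Injective (pvKeyOf pN) := by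
  intro a b h
  rw [pvKeyOf_eq, pvKeyOf_eq] at h
  have h2 := (Prod.mk.injEq _ _ _ _).mp (toLex_inj.mp h)
  have h3 := (Prod.mk.injEq _ _ _ _).mp (toLex_inj.mp h2.2)
  exact h3.2

-- B's concatenation is pairwise non-decreasing under the sort key
theorem pv_alt_pairwise (av pref : List String) :
    ((pvKeys pref.length).flatMap (fun kk =>
        PySem.List.sorted
          (av.filter (fun t =>
            pvTag (pref.map pvNormalize) ((pref.map pvNormalize).map pvBase) t == kk))
          (fun x => x) false)).Pairwise
      (fun a b => pvKeyOf (pref.map pvNormalize) a ≤ pvKeyOf (pref.map pvNormalize) b) := by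
  rw [List.flatMap, List.pairwise_flatten]
  constructor
  · intro l hl
    simp only [List.mem_map] at hl
    obtain ⟨kk, -, rfl⟩ := hl
    refine (PySem.List.sorted_pairwise _ _).imp_of_mem ?_
    intro a b ha hb hab
    rw [PySem.List.mem_sorted, List.mem_filter] at ha hb
    have hta : pvTag (pref.map pvNormalize) ((pref.map pvNormalize).map pvBase) a = kk := by simpa using ha.2
    have htb : pvTag (pref.map pvNormalize) ((pref.map pvNormalize).map pvBase) b = kk := by simpa using hb.2
    rw [pvKeyOf_eq, pvKeyOf_eq, hta, htb, Prod.Lex.le_iff]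
    exact Or.inr ⟨rfl, by rw [Prod.Lex.le_iff]; exact Or.inr ⟨rfl, hab⟩⟩
  · refine List.Pairwise.map _ ?_ (pvKeys_pairwise pref.length)
    intro kk kk' hlt x hx y hy
    rw [PySem.List.mem_sorted, List.mem_filter] at hx hy
    have htx : pvTag (pref.map pvNormalize) ((pref.map pvNormalize).map pvBase) x = kk := by simpa using hx.2
    have hty : pvTag (pref.map pvNormalize) ((pref.map pvNormalize).map pvBase) y = kk' := by simpa using hy.2
    rw [pvKeyOf_eq, pvKeyOf_eq, htx, hty]
    apply le_of_lt
    rw [Prod.Lex.lt_iff]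
    rcases hlt with h | ⟨h1, h2⟩
    · exact Or.inl h
    · exact Or.inr ⟨h1, by rw [Prod.Lex.lt_iff]; exact Or.inl h2⟩

-- A in sorted-by-bundled-key normal form
theorem pv_a_eq_sorted (av pref : List String) :
    rank_tracks av pref
      = PySem.List.sorted av (pvKeyOf (pref.map pvNormalize)) false := by
  unfold rank_tracks
  rw [pv_sorted2_eq_sorted_toLex av (pvScore (pref.map pvNormalize))]
  rfl

-- ===== VERDICT (by name: the statement is the Claim_ definition above) =====
theorem rank_tracks_spec : Claim_equal_rank_tracks := by
  intro av pref _hdom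
  unfold Spec_rank_tracks
  rw [pv_a_eq_sorted, pv_alt_eq_flatMap]
  have hBperm : ((pvKeys pref.length).flatMap (fun kk =>
      PySem.List.sorted
        (av.filter (fun t =>
          pvTag (pref.map pvNormalize) ((pref.map pvNormalize).map pvBase) t == kk))
        (fun x => x) false)).Perm av := by
    refine (List.Perm.flatMap_left _
      (fun kk _ => PySem.List.sorted_perm _ _ _)).trans ?_
    refine pv_partition_perm _ _ _ (pvKeys_nodup _) (fun t _ => ?_)
    have h := pvTag_mem_pvKeys (pref.map pvNormalize) t
    rwa [List.length_map] at h
  exact PySem.List.eq_of_perm_of_pairwise_le_of_injective (pvKeyOf (pref.map pvNormalize))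
    (pvKeyOf_injective _)
    ((PySem.List.sorted_perm _ _ _).trans hBperm.symm)
    (PySem.List.sorted_pairwise _ _)
    (pv_alt_pairwise av pref)
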